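-- pv_equiv track=rewrite | github.com/shreyash-Pandey-Katni/placementPractice | turing/validator.py | validateHTMLwithRespectivePlaceholders
-- ===== SOURCE A (Python) =====
-- from typing import Dict
--
-- def validateHTMLwithRespectivePlaceholders(html: str, replacements: Dict[str, str]) -> bool:
--     """Validate an HTML string.
--
--     Args:
--         html: The HTML string to validate.
--         replacements: A dictionary of placeholders and their respective values.
--
--     Returns:
--         True if the HTML string is valid, False otherwise.
--     """
--     # Leading and trailing whitespace should be ignored.
--     html = html.strip()
--
--     # Replacement values must be non-empty strings.
--     for value in replacements.values():
--         if not value or value == "":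
--             return False
--
--     # HTML string must be at least 5 characters long.
--     if len(html) < 5:
--         return False
--
--     # HTML string must contain all the placeholders.
--     for placeholder in replacements.keys():
--         if "{"+placeholder+"}" not in html:
--             return False
--
--     # List all placeholders in the HTML string. placeholders must be surrounded by curly braces. use regex
--     placeholders = []
--     for i in range(len(html)):
--         if html[i] == "{":
--             placeholders.append(html[i+1:html.find("}", i+1)])
--
--     if placeholders != list(replacements.keys()):
--         return False
--     return True
-- ===== SOURCE B (Python) =====
-- def validateHTMLwithRespectivePlaceholders(html, replacements):
--     s = html.strip()
--     if any(not v for v in replacements.values()):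
--         return False
--     if len(s) < 5:
--         return False
--     if not all("{" + k + "}" in s for k in replacements):
--         return False
--     # One reverse sweep: j is the index of the next '}' at or after the
--     # current position (len(s) when there is none); every '{' contributes
--     # the text up to that brace.
--     found = []
--     j = len(s)
--     for i in range(len(s) - 1, -1, -1):
--         if s[i] == '}':
--             j = i
--         elif s[i] == '{':
--             found.append(s[i + 1:j])
--     found.reverse()
--     return found == list(replacements)
-- ===== Notes on version B (the rewrite author's own statement) =====
-- stated objective: alternative
-- what changed: A rescans forward with str.find from every '{' (and early-returns from explicit loops); B makes one reverse sweep over the string carrying the index of the next '}', collecting all placeholders in a single pass, with the guards as any/all conjunctions.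
import Mathlib
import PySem

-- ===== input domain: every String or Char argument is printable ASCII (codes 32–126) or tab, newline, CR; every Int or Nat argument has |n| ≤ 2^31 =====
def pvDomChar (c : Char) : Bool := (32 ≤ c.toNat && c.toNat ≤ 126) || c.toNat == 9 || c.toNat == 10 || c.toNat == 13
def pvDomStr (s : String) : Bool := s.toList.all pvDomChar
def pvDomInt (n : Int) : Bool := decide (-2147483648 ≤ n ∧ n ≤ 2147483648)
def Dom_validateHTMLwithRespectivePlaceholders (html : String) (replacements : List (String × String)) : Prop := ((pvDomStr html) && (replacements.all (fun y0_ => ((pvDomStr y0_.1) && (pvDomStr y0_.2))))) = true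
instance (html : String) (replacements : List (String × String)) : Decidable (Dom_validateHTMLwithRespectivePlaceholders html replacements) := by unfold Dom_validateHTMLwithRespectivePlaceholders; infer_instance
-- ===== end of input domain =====

-- B replaces A's per-'{' forward rescans (str.find from every '{') by one reverse sweep that
-- carries the index of the next '}'; objective: alternative (single-sweep extraction).

-- ===== PORT A =====
-- A: strip; early-return loops over values and keys; forward loop over all indices, calling
-- find("}", i+1) at each '{'; final list comparison.
def validateHTMLwithRespectivePlaceholders (html : String) (replacements : List (String × String)) : Bool :=
  let s := PySem.Chars.strip html.toList
  let d := PySem.Dict.ofList replacements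
  -- for value in replacements.values(): if not value or value == "": return False
  if d.values.any (fun v => v.toList.isEmpty || v == "") then false
  -- if len(html) < 5: return False
  else if s.length < 5 then false
  -- for placeholder in replacements.keys(): if "{"+placeholder+"}" not in html: return False
  else if d.keys.any (fun k => !PySem.Chars.isIn ('{' :: (k.toList ++ ['}'])) s) then false
  else
    -- for i in range(len(html)): if html[i] == "{": placeholders.append(html[i+1:html.find("}", i+1)])
    let placeholders := (List.range s.length).foldl
      (fun acc (i : Nat) =>
        if PySem.List.pyGet? s (i : Int) == some '{' then
          acc ++ [PySem.List.slice s (some ((i : Int) + 1))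
                    (some (PySem.Chars.findFrom s ['}'] ((i : Int) + 1) none))]
        else acc) []
    -- if placeholders != list(replacements.keys()): return False / return True
    if placeholders ≠ d.keys.map String.toList then false else true

-- ===== PORT B =====
-- B: strip; guards as any/all; ONE reverse sweep (j = index of the next '}' at or after the
-- current position, len(s) when there is none) collecting the placeholders back-to-front.
def validateHTMLwithRespectivePlaceholders_alt (html : String) (replacements : List (String × String)) : Bool :=
  let s := PySem.Chars.strip html.toList
  if (PySem.Dict.ofList replacements).values.any (fun v => v.toList.isEmpty) then false
  else if s.length < 5 then false
  else if !((PySem.Dict.ofList replacements).keys.all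
              (fun k => PySem.Chars.isIn ('{' :: (k.toList ++ ['}'])) s)) then false
  else
    -- found = []; j = len(s); for i in range(len(s)-1, -1, -1): ...
    let st := (PySem.List.pyRange ((s.length : Int) - 1) (-1) (-1)).foldl
      (fun (st : Int × List (List Char)) i =>
        if PySem.List.pyGet? s i == some '}' then (i, st.2)
        else if PySem.List.pyGet? s i == some '{' then
          (st.1, st.2 ++ [PySem.List.slice s (some (i + 1)) (some st.1)])
        else st)
      ((s.length : Int), [])
    -- found.reverse(); return found == list(replacements)
    decide (st.2.reverse = (PySem.Dict.ofList replacements).keys.map String.toList)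

-- ===== PRECONDITION & SPEC =====
def Spec_validateHTMLwithRespectivePlaceholders (html : String) (replacements : List (String × String)) (out : Bool) : Prop := out = validateHTMLwithRespectivePlaceholders_alt html replacements
instance (html : String) (replacements : List (String × String)) (out : Bool) : Decidable (Spec_validateHTMLwithRespectivePlaceholders html replacements out) := by unfold Spec_validateHTMLwithRespectivePlaceholders; infer_instance

-- ===== CLAIM (what is proved, stated in full; the proofs are below) =====
def Claim_equal_validateHTMLwithRespectivePlaceholders : Prop := ∀ (html : String) (replacements : List (String × String)), Dom_validateHTMLwithRespectivePlaceholders html replacements → Spec_validateHTMLwithRespectivePlaceholders html replacements (validateHTMLwithRespectivePlaceholders html replacements)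

-- ===== LEMMAS AND PROOFS =====

-- pvP c = "c is not a closing brace"; pvW s k = index of the first '}' at position ≥ k (s.length when none)
def pvP : Char → Bool := fun c => c != '}'
def pvW (s : List Char) (k : Nat) : Nat := k + ((s.drop k).takeWhile pvP).length
-- pvHit s i = "s[i] is '{'"; pvL s = the list of those positions
def pvHit (s : List Char) (i : Nat) : Bool := PySem.List.pyGet? s (i : Int) == some '{'
def pvL (s : List Char) : List Nat := (List.range s.length).filter (pvHit s)
-- the placeholder A extracts for a '{' at i, and the one B extracts
def pvEntryA (s : List Char) (i : Nat) : List Char :=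
  PySem.List.slice s (some ((i : Int) + 1)) (some (PySem.Chars.findFrom s ['}'] ((i : Int) + 1) none))
def pvEntryB (s : List Char) (i : Nat) : List Char :=
  PySem.List.slice s (some ((i : Int) + 1)) (some ((pvW s (i + 1) : Nat) : Int))

-- takeWhile basics
theorem pv_tw_get (p : Char → Bool) (l : List Char) (i : Nat) (c : Char)
    (hc : l[i]? = some c) (h : i < (l.takeWhile p).length) : p c = true := by
  induction l generalizing i with
  | nil => simp at h
  | cons d r ih =>
    by_cases hd : p d
    · rw [List.takeWhile_cons_of_pos hd] at h
      cases i with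
      | zero => simp at hc; rw [← hc]; exact hd
      | succ j => exact ih j (by simpa using hc) (by simpa using h)
    · rw [List.takeWhile_cons_of_neg hd] at h; simp at h

theorem pv_tw_at (p : Char → Bool) (l : List Char) (h : (l.takeWhile p).length < l.length) :
    ∃ c, l[(l.takeWhile p).length]? = some c ∧ p c = false := by
  induction l with
  | nil => simp at h
  | cons d r ih =>
    by_cases hd : p d
    · rw [List.takeWhile_cons_of_pos hd] at h ⊢
      obtain ⟨c, hc, hpc⟩ := ih (by simpa using h)
      exact ⟨c, by simpa using hc, hpc⟩
    · rw [List.takeWhile_cons_of_neg hd]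
      exact ⟨d, by simp, by simpa using hd⟩

-- [a] is a prefix of l.drop m iff l[m]? = some a
theorem pv_singleton_prefix_drop (a : Char) (l : List Char) (m : Nat) :
    [a] <+: l.drop m ↔ l[m]? = some a := by
  rw [← List.head?_drop]
  cases l.drop m with
  | nil => simp
  | cons c r => simp [List.cons_prefix_cons, eq_comm]

-- find on a single-char needle, via its takeWhile index
theorem pv_find_eq (l : List Char) (h : '}' ∈ l) :
    PySem.Chars.find l ['}'] = ((l.takeWhile pvP).length : Int) := by
  have hinf : ['}'] <:+: l := (List.singleton_infix_iff '}' l).mpr h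
  have h0 : 0 ≤ PySem.Chars.find l ['}'] := (PySem.Chars.find_nonneg_iff l ['}']).mpr hinf
  obtain ⟨hpre, hmin⟩ := PySem.Chars.find_spec h0
  rw [pv_singleton_prefix_drop] at hpre
  have hflt : (PySem.Chars.find l ['}']).toNat < l.length := (List.getElem?_eq_some_iff.mp hpre).1
  have hfget : l[(PySem.Chars.find l ['}']).toNat]'hflt = '}' :=
    (List.getElem?_eq_some_iff.mp hpre).2
  have hwf : (l.takeWhile pvP).length = (PySem.Chars.find l ['}']).toNat := by
    rcases Nat.lt_trichotomy (l.takeWhile pvP).length (PySem.Chars.find l ['}']).toNat with hlt | he | hgt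
    · exfalso
      have hw : (l.takeWhile pvP).length < l.length := lt_trans hlt hflt
      obtain ⟨c, hc, hpc⟩ := pv_tw_at pvP l hw
      have hc' : c = '}' := by simpa [pvP] using hpc
      exact hmin _ hlt ((pv_singleton_prefix_drop '}' l _).mpr (hc' ▸ hc))
    · exact he
    · have := pv_tw_get pvP l _ '}' hpre hgt
      simp [pvP] at this
  rw [hwf]
  omega

theorem pvW_last (s : List Char) : pvW s s.length = s.length := by simp [pvW]

theorem pvW_step (s : List Char) (k : Nat) (hk : k < s.length) :
    pvW s k = if s[k]'hk = '}' then k else pvW s (k + 1) := by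
  unfold pvW
  rw [← List.getElem_cons_drop hk]
  by_cases h : s[k]'hk = '}'
  · rw [List.takeWhile_cons_of_neg (by simp [pvP, h])]
    simp [h]
  · rw [List.takeWhile_cons_of_pos (by simp [pvP, h])]
    simp only [h, if_false, List.length_cons]
    omega

-- slice from a natural start is a take of the drop
theorem pv_slice_take (s : List Char) (a : Nat) (ha : a ≤ s.length) (b : Int) :
    PySem.List.slice s (some (a : Int)) (some b) =
      (s.drop a).take (PySem.List.clampIdx s.length b - a) := by
  simp [PySem.List.slice, Nat.min_eq_left ha]

theorem pv_not_mem_slice (s : List Char) (a : Nat) (ha : a ≤ s.length) (b : Int)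
    (h : '}' ∉ s.drop a) : '}' ∉ PySem.List.slice s (some (a : Int)) (some b) := by
  rw [pv_slice_take s a ha b]
  intro hm
  exact h (List.mem_of_mem_take hm)

-- terminated '{': the two entries coincide
theorem pv_entry_eq_term (s : List Char) (i : Nat) (hi : i < s.length)
    (h : '}' ∈ s.drop (i + 1)) : pvEntryA s i = pvEntryB s i := by
  unfold pvEntryA pvEntryB
  have hle : i + 1 ≤ s.length := hi
  have hcast : ((i : Int) + 1) = ((i + 1 : Nat) : Int) := by push_cast; ring
  rw [hcast, PySem.Chars.findFrom_natCast s ['}'] (i + 1) hle, pv_find_eq _ h]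
  have hne : (((s.drop (i + 1)).takeWhile pvP).length : Int) ≠ -1 := by omega
  rw [if_neg hne]
  unfold pvW
  push_cast
  ring_nf

-- B's loop body as a named function (definitionally B's lambda)
def pvStep (s : List Char) (st : Int × List (List Char)) (i : Int) : Int × List (List Char) :=
  if PySem.List.pyGet? s i == some '}' then (i, st.2)
  else if PySem.List.pyGet? s i == some '{' then
    (st.1, st.2 ++ [PySem.List.slice s (some (i + 1)) (some st.1)])
  else st

theorem pvStep_eval (s : List Char) (k : Nat) (hk : k < s.length) (acc : List (List Char)) :
    pvStep s ((pvW s (k + 1) : Int), acc) (k : Int)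
      = ((pvW s k : Int), acc ++ if pvHit s k then [pvEntryB s k] else []) := by
  have hget : PySem.List.pyGet? s (k : Int) = some (s[k]'hk) := by
    rw [PySem.List.pyGet?_natCast]
    exact List.getElem?_eq_getElem hk
  unfold pvStep pvHit pvEntryB
  rw [hget]
  by_cases hbr : s[k]'hk = '}'
  · rw [pvW_step s k hk, if_pos hbr]
    simp [hbr]
  · rw [pvW_step s k hk, if_neg hbr]
    by_cases hcu : s[k]'hk = '{'
    · simp [hcu]
    · simp [hcu, hbr]

-- the reverse-sweep invariant
theorem pv_loopB (s : List Char) (k : Nat) (hk : k ≤ s.length) (acc : List (List Char)) :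
    (List.range k).foldr (fun (i : Nat) st => pvStep s st (i : Int)) ((pvW s k : Int), acc)
    = ((pvW s 0 : Int), acc ++ (((List.range k).filter (pvHit s)).map (pvEntryB s)).reverse) := by
  induction k generalizing acc with
  | zero => simp
  | succ k ih =>
    have hk' : k < s.length := hk
    rw [List.range_succ, List.foldr_append]
    simp only [List.foldr_cons, List.foldr_nil]
    rw [pvStep_eval s k hk' acc, ih (le_of_lt hk')]
    by_cases hh : pvHit s k
    · simp [List.filter_append, hh]
    · simp [List.filter_append, hh]

-- pyRange(len-1, -1, -1) is the descending index list
theorem pv_pyRange_down (n : Nat) :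
    PySem.List.pyRange ((n : Int) - 1) (-1) (-1) =
      ((List.range n).reverse).map (fun (i : Nat) => (i : Int)) := by
  have hrev : (List.range n).reverse = (List.range n).map (fun i => n - 1 - i) := by
    rw [List.range_eq_range', List.reverse_range']
    simp
    rw [List.range_eq_range']
  rw [hrev, List.map_map, PySem.List.pyRange_neg_one]
  have hn : (((n : Int) - 1) - (-1)).toNat = n := by omega
  rw [hn]
  apply List.map_congr_left
  intro k hk
  rw [List.mem_range] at hk
  simp only [Function.comp]
  omega

-- B's fold equals the mapped hit list
theorem pv_entriesB (s : List Char) :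
    ((PySem.List.pyRange ((s.length : Int) - 1) (-1) (-1)).foldl
        (fun (st : Int × List (List Char)) i =>
          if PySem.List.pyGet? s i == some '}' then (i, st.2)
          else if PySem.List.pyGet? s i == some '{' then
            (st.1, st.2 ++ [PySem.List.slice s (some (i + 1)) (some st.1)])
          else st)
        ((s.length : Int), [])).2.reverse = (pvL s).map (pvEntryB s) := by
  have hinit : ((s.length : Nat) : Int) = ((pvW s s.length : Nat) : Int) := by rw [pvW_last]
  rw [pv_pyRange_down, List.foldl_map, List.foldl_reverse, hinit]
  show (List.foldr (fun (i : Nat) st => pvStep s st (i : Int)) ((pvW s s.length : Int), [])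
      (List.range s.length)).2.reverse = _
  rw [pv_loopB s s.length le_rfl []]
  simp [pvL]

-- A's fold equals the mapped hit list
theorem pv_entriesA (s : List Char) :
    (List.range s.length).foldl
      (fun acc (i : Nat) =>
        if PySem.List.pyGet? s (i : Int) == some '{' then
          acc ++ [PySem.List.slice s (some ((i : Int) + 1))
                    (some (PySem.Chars.findFrom s ['}'] ((i : Int) + 1) none))]
        else acc) []
    = (pvL s).map (pvEntryA s) := by
  exact PySem.List.foldl_append_if (pvHit s) (pvEntryA s) (List.range s.length) []

-- membership in pvL
theorem pv_mem_L (s : List Char) (i : Nat) :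
    i ∈ pvL s ↔ ∃ h : i < s.length, s[i]'h = '{' := by
  unfold pvL pvHit
  simp only [List.mem_filter, List.mem_range]
  constructor
  · rintro ⟨hi, hh⟩
    refine ⟨hi, ?_⟩
    rw [PySem.List.pyGet?_natCast, List.getElem?_eq_getElem hi] at hh
    simpa using hh
  · rintro ⟨hi, hh⟩
    refine ⟨hi, ?_⟩
    rw [PySem.List.pyGet?_natCast, List.getElem?_eq_getElem hi]
    simpa using hh

-- an occurrence of "{k}" (k brace-free) yields a hit whose entry is k in BOTH programs
theorem pv_occ (s k : List Char) (hk : '}' ∉ k) (h : ('{' :: (k ++ ['}'])) <:+: s) :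
    ∃ p, p ∈ pvL s ∧ pvEntryA s p = k ∧ pvEntryB s p = k ∧ '}' ∈ s.drop (p + 1) := by
  obtain ⟨u, v, huv⟩ := h
  have hs : s = u ++ ('{' :: (k ++ ['}'] ++ v)) := by rw [← huv]; simp
  have hdrop0 : s.drop u.length = '{' :: (k ++ ['}'] ++ v) := by
    rw [hs, List.drop_left]
  have hdrop1 : s.drop (u.length + 1) = k ++ '}' :: v := by
    rw [← List.drop_drop, hdrop0]
    simp
  have hlen : u.length < s.length := by
    rw [hs]; simp
  have hle1 : u.length + 1 ≤ s.length := hlen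
  have hget : s[u.length]'hlen = '{' := by
    have := List.head?_drop (l := s) (i := u.length)
    rw [hdrop0, List.getElem?_eq_getElem hlen] at this
    simpa using this.symm
  have htw : (s.drop (u.length + 1)).takeWhile pvP = k := by
    rw [hdrop1, List.takeWhile_append]
    simp [pvP]
    intro _ x hx
    exact fun he => hk (he ▸ hx)
  have hW : pvW s (u.length + 1) = u.length + 1 + k.length := by
    unfold pvW; rw [htw]
  have hcast : ((u.length : Int) + 1) = ((u.length + 1 : Nat) : Int) := by push_cast; ring
  have hslice : PySem.List.slice s (some ((u.length + 1 : Nat) : Int))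
      (some (((u.length + 1 : Nat) : Int) + (k.length : Int))) = k := by
    rw [PySem.List.slice_natCast_add s (u.length + 1) k.length, hdrop1, List.take_left]
  refine ⟨u.length, ?_, ?_, ?_, ?_⟩
  · exact (pv_mem_L s u.length).mpr ⟨hlen, hget⟩
  · unfold pvEntryA
    rw [hcast, PySem.Chars.findFrom_natCast s ['}'] (u.length + 1) hle1,
        pv_find_eq _ (by rw [hdrop1]; simp), htw]
    rw [if_neg (by omega)]
    exact hslice
  · unfold pvEntryB
    rw [hcast, hW]
    exact_mod_cast hslice
  · rw [hdrop1]; simp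

-- two distinct positions with the same entry force a duplicate in the mapped list
theorem pv_two_le_count {α β : Type} [BEq α] [LawfulBEq α] [BEq β] [LawfulBEq β] (l : List α)
    (a b : α) (ha : a ∈ l) (hb : b ∈ l) (hne : a ≠ b) (f : α → β) (k : β)
    (hfa : f a = k) (hfb : f b = k) : 2 ≤ (l.map f).count k := by
  have hcm : (l.map f).count k = l.countP (fun x => f x == k) := by
    rw [List.count_eq_countP, List.countP_map]
    rfl
  have hperm : l.Perm (a :: l.erase a) := List.perm_cons_erase ha
  have hbe : b ∈ l.erase a := (List.mem_erase_of_ne hne.symm).mpr hb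
  have h1 : 0 < (l.erase a).countP (fun x => f x == k) :=
    List.countP_pos_iff.mpr ⟨b, hbe, by simp [hfb]⟩
  rw [hcm, hperm.countP_eq, List.countP_cons, hfa]
  simp only [BEq.rfl, if_true]
  omega

-- with an unterminated '{' present, neither entry list can equal the (distinct) keys
theorem pv_map_ne (s : List Char) (e : Nat → List Char)
    (i0 : Nat) (hi0 : i0 ∈ pvL s) (hnb : '}' ∉ s.drop (i0 + 1)) (hk0 : '}' ∉ e i0)
    (hocc : ∀ k, '}' ∉ k → ('{' :: (k ++ ['}'])) <:+: s →
      ∃ p, p ∈ pvL s ∧ e p = k ∧ '}' ∈ s.drop (p + 1))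
    (K : List (List Char)) (hK : K.Nodup)
    (hg : ∀ k ∈ K, PySem.Chars.isIn ('{' :: (k ++ ['}'])) s) :
    (pvL s).map e ≠ K := by
  intro hEq
  have hkK : e i0 ∈ K := hEq ▸ List.mem_map_of_mem hi0
  have hinf : ('{' :: (e i0 ++ ['}'])) <:+: s :=
    (PySem.Chars.isIn_iff_infix _ s).mp (hg _ hkK)
  obtain ⟨p, hpL, hep, hpbr⟩ := hocc (e i0) hk0 hinf
  have hne : p ≠ i0 := fun h => hnb (h ▸ hpbr)
  have h2 : 2 ≤ ((pvL s).map e).count (e i0) :=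
    pv_two_le_count (pvL s) p i0 hpL hi0 hne e (e i0) hep rfl
  have h1 : K.count (e i0) ≤ 1 := List.nodup_iff_count_le_one.mp hK (e i0)
  rw [hEq] at h2
  omega

-- a slice starting at i+1 stays inside s.drop (i+1): neither entry can contain '}' there
theorem pv_entryA_nb (s : List Char) (i : Nat) (hi : i < s.length)
    (h : '}' ∉ s.drop (i + 1)) : '}' ∉ pvEntryA s i := by
  unfold pvEntryA
  rw [show ((i : Int) + 1) = ((i + 1 : Nat) : Int) by push_cast; ring]
  exact pv_not_mem_slice s (i + 1) hi _ h

theorem pv_entryB_nb (s : List Char) (i : Nat) (hi : i < s.length)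
    (h : '}' ∉ s.drop (i + 1)) : '}' ∉ pvEntryB s i := by
  unfold pvEntryB
  rw [show ((i : Int) + 1) = ((i + 1 : Nat) : Int) by push_cast; ring]
  exact pv_not_mem_slice s (i + 1) hi _ h

-- helpers used by the final assembly
theorem pv_beq_empty (v : String) : (v == "") = v.toList.isEmpty := by
  rcases h : v.toList.isEmpty with _ | _
  · rw [List.isEmpty_eq_false_iff] at h
    simp only [beq_eq_false_iff_ne, ne_eq]
    intro hv; subst hv; simp at h
  · rw [List.isEmpty_iff] at h
    simp only [show v = "" by simpa [String.toList_eq_nil_iff] using h, BEq.rfl]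

-- ===== VERDICT (by name: the statement is the Claim_ definition above) =====
theorem validateHTMLwithRespectivePlaceholders_spec : Claim_equal_validateHTMLwithRespectivePlaceholders := by
  intro html replacements _
  unfold Spec_validateHTMLwithRespectivePlaceholders
  simp only [validateHTMLwithRespectivePlaceholders, validateHTMLwithRespectivePlaceholders_alt]
  have hnodup : (PySem.Dict.ofList replacements).keys.Nodup :=
    PySem.Dict.nodup_keys_ofList replacements
  generalize hd : PySem.Dict.ofList replacements = d at *
  generalize PySem.Chars.strip html.toList = s
  have hval : (d.values.any (fun v => v.toList.isEmpty || v == ""))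
      = (d.values.any (fun v => v.toList.isEmpty)) := by
    apply PySem.List.any_congr_mem
    intro v _
    rw [pv_beq_empty, Bool.or_self]
  have hmem : (d.keys.any (fun k => !PySem.Chars.isIn ('{' :: (k.toList ++ ['}'])) s))
      = !(d.keys.all (fun k => PySem.Chars.isIn ('{' :: (k.toList ++ ['}'])) s)) :=
    Eq.symm List.not_all_eq_any_not
  rw [hval, hmem, pv_entriesA s, pv_entriesB s]
  by_cases hv : d.values.any (fun v => v.toList.isEmpty)
  · simp [hv]
  · by_cases h5 : s.length < 5
    · simp [hv, h5]
    · by_cases hm : d.keys.all (fun k => PySem.Chars.isIn ('{' :: (k.toList ++ ['}'])) s)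
      · simp only [hv, h5, hm, Bool.not_true, Bool.false_eq_true, if_false]
        -- guards passed: compare the two placeholder lists against the keys
        have hg : ∀ k ∈ d.keys.map String.toList,
            PySem.Chars.isIn ('{' :: (k ++ ['}'])) s := by
          intro k hkm
          obtain ⟨k', hk', rfl⟩ := List.mem_map.mp hkm
          exact List.all_eq_true.mp hm k' hk'
        have hK : (d.keys.map String.toList).Nodup :=
          hnodup.map (fun a b hab => by
            have : (String.ofList a.toList) = (String.ofList b.toList) := by rw [hab]
            simpa using this)
        by_cases hterm : ∀ i ∈ pvL s, '}' ∈ s.drop (i + 1)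
        · -- every '{' is terminated: the two entry lists coincide elementwise
          have hAB : (pvL s).map (pvEntryA s) = (pvL s).map (pvEntryB s) := by
            apply List.map_congr_left
            intro i hi
            obtain ⟨hlt, -⟩ := (pv_mem_L s i).mp hi
            exact pv_entry_eq_term s i hlt (hterm i hi)
          rw [hAB]
          by_cases heq : (pvL s).map (pvEntryB s) = d.keys.map String.toList
          · simp [heq]
          · simp [heq]
        · -- some '{' is unterminated: both lists contain a duplicate-forcing entry, both sides are false
          push Not at hterm
          obtain ⟨i0, hi0, hnb⟩ := hterm
          obtain ⟨hlt0, -⟩ := (pv_mem_L s i0).mp hi0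
          have hAne : (pvL s).map (pvEntryA s) ≠ d.keys.map String.toList :=
            pv_map_ne s (pvEntryA s) i0 hi0 hnb (pv_entryA_nb s i0 hlt0 hnb)
              (fun k hk hinf => by
                obtain ⟨p, h1, h2, -, h4⟩ := pv_occ s k hk hinf
                exact ⟨p, h1, h2, h4⟩)
              _ hK hg
          have hBne : (pvL s).map (pvEntryB s) ≠ d.keys.map String.toList :=
            pv_map_ne s (pvEntryB s) i0 hi0 hnb (pv_entryB_nb s i0 hlt0 hnb)
              (fun k hk hinf => by
                obtain ⟨p, h1, -, h3, h4⟩ := pv_occ s k hk hinf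
                exact ⟨p, h1, h3, h4⟩)
              _ hK hg
          simp [hAne, hBne]
      · simp [hv, h5, hm]
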